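-- pv_equiv track=rewrite | github.com/radosnystudent/Graph-algorithms | algorithms/chinese_postman.py | bfs
-- ===== SOURCE A (Python) =====
-- def bfs(matrix, start, end):
--     graph = {}
--     path = list()
--
--     for i in range(len(matrix)):
--         graph[i] = []
--         for j in range(len(matrix)):
--             if matrix[i][j] != 0:
--                 graph[i].append(j)
--
--     visited, queue = set([start]), list([start])
--     while queue:
--         vertex = queue.pop(0)
--         path.append(vertex)
--         for v in graph[vertex]:
--             if v not in visited:
--                 visited.add(v)
--                 queue.append(v)
--
--     if end in path:
--         return True
--     return False
-- ===== SOURCE B (Python) =====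
-- def bfs(matrix, start, end):
--     # Round-based closure: saturate the reachable set without a worklist.
--     n = len(matrix)
--     reach = {start}
--     while True:
--         frontier = {j for i in reach for j in range(n)
--                     if matrix[i][j] != 0 and j not in reach}
--         if not frontier:
--             return end in reach
--         reach |= frontier
-- ===== Notes on version B (the rewrite author's own statement) =====
-- stated objective: alternative
-- what changed: Replaces A's dict-of-adjacency-lists plus FIFO-queue BFS (pop(0), per-vertex neighbor scan, path list) by a worklist-free round-based closure: repeatedly compute the whole frontier {j : reachable from some current node, not yet reached} straight off the matrix and union it in until it is empty, then test membership.
import Mathlib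
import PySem

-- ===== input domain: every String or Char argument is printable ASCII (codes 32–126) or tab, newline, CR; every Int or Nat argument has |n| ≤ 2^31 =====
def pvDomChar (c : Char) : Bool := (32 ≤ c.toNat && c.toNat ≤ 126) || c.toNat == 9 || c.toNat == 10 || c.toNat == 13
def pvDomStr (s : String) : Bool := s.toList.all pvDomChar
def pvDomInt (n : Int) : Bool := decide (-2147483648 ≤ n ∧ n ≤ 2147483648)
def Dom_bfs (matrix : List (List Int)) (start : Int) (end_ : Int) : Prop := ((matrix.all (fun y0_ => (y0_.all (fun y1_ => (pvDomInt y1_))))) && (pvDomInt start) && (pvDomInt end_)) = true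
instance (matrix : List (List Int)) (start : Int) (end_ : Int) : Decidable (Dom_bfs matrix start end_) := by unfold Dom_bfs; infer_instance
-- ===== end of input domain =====

-- B replaces A's queue-based BFS by a worklist-free round-based closure (saturate the
-- reachable set frontier by frontier); same membership answer, genuinely different traversal.


-- matrix[i][j] (defaults only reached outside Pre_bfs, where Python raises)
def pvEntry (matrix : List (List Int)) (i j : Int) : Int :=
  (PySem.List.pyGet? ((PySem.List.pyGet? matrix i).getD []) j).getD 0

-- ===== PORT A =====
-- inner loop of the graph-building pass: graph[i] = []; for j in range(len(matrix)): … append(j)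
def bfsRow (matrix : List (List Int)) (i : Int) : List Int :=
  (PySem.List.pyRange 0 (matrix.length : Int) 1).foldl
    (fun acc j => if pvEntry matrix i j ≠ 0 then acc ++ [j] else acc) []

-- for i in range(len(matrix)): graph[i] = [ … ]
def bfsGraph (matrix : List (List Int)) : PySem.Dict Int (List Int) :=
  (PySem.List.pyRange 0 (matrix.length : Int) 1).foldl
    (fun g i => g.insert i (bfsRow matrix i)) PySem.Dict.empty

-- used by the termination proofs of both loops (cited in decreasing_by)
theorem pvFilterLenLe {α : Type} {p q : α → Bool} (himp : ∀ x, q x = true → p x = true) :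
    ∀ t : List α, (t.filter q).length ≤ (t.filter p).length := by
  intro t
  induction t with
  | nil => simp
  | cons a t ih =>
    simp only [List.filter_cons]
    split_ifs with h1 h2 h3
    · simpa using ih
    · exact absurd (himp a h1) h2
    · simp only [List.length_cons]; exact ih.trans (Nat.le_succ _)
    · exact ih

theorem pvFilterLenLt {α : Type} {p q : α → Bool} (U : List α) (himp : ∀ x, q x = true → p x = true)
    {v} (hv : v ∈ U) (hp : p v = true) (hq : q v = false) :
    (U.filter q).length < (U.filter p).length := by
  induction U with
  | nil => cases hv
  | cons a t ih =>
    rcases List.mem_cons.mp hv with rfl | ha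
    · simp only [List.filter_cons, hp, hq, Bool.false_eq_true, if_false, if_true,
        List.length_cons]
      exact Nat.lt_succ_of_le (pvFilterLenLe himp t)
    · simp only [List.filter_cons]
      split_ifs with h1 h2 h3
      · exact Nat.succ_lt_succ (ih ha)
      · exact absurd (himp a h1) h2
      · exact Nat.lt_succ_of_lt (ih ha)
      · exact ih ha

-- one BFS step's inner loop: for v in graph[vertex]: if v not in visited: …
def bfsStep (vq : PySem.Set Int × List Int) (v : Int) : PySem.Set Int × List Int :=
  if v ∈ vq.1 then vq else (vq.1.add v, vq.2 ++ [v])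

-- measure fact for the fold, cited in decreasing_by
theorem pvBfsStep_measure (U : List Int) (nbs : List Int) (hn : ∀ v ∈ nbs, v ∈ U) :
    ∀ (vis : PySem.Set Int) (q : List Int),
      ((U.filter (fun x => decide (x ∉ (nbs.foldl bfsStep (vis, q)).1))).length
        + (nbs.foldl bfsStep (vis, q)).2.length)
      ≤ (U.filter (fun x => decide (x ∉ vis))).length + q.length := by
  induction nbs with
  | nil => intro vis q; simp
  | cons v tl ih =>
    intro vis q
    have hv : v ∈ U := hn v (List.mem_cons_self)
    have hn' : ∀ x ∈ tl, x ∈ U := fun x hx => hn x (List.mem_cons_of_mem _ hx)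
    simp only [List.foldl_cons]
    by_cases hmem : v ∈ vis
    · have hstep : bfsStep (vis, q) v = (vis, q) := by simp [bfsStep, hmem]
      simp only [hstep]
      exact ih hn' vis q
    · have hstep : bfsStep (vis, q) v = (vis.add v, q ++ [v]) := by simp [bfsStep, hmem]
      simp only [hstep]
      refine (ih hn' _ _).trans ?_
      have hlt : (U.filter (fun x => decide (x ∉ vis.add v))).length
          < (U.filter (fun x => decide (x ∉ vis))).length := by
        refine pvFilterLenLt U ?_ (v := v) hv ?_ ?_
        · intro x hx
          simp only [decide_eq_true_eq, PySem.Set.mem_add] at hx ⊢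
          exact fun hmem' => hx (Or.inl hmem')
        · simpa using hmem
        · simp [PySem.Set.mem_add]
      simp only [List.length_append, List.length_singleton]
      omega

-- while queue: vertex = queue.pop(0); path.append(vertex); for v in graph[vertex]: …
def bfsLoop (g : PySem.Dict Int (List Int)) (path : List Int)
    (visited : PySem.Set Int) (queue : List Int) : List Int :=
  match queue with
  | [] => path
  | vertex :: rest =>
    let vq := (g.getD vertex []).foldl bfsStep (visited, rest)
    bfsLoop g (path ++ [vertex]) vq.1 vq.2
termination_by (g.values.flatten.filter (fun x => decide (x ∉ visited))).length + queue.length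
decreasing_by
  have hn : ∀ v ∈ g.getD vertex [], v ∈ g.values.flatten := by
    intro v hv
    rw [PySem.Dict.getD_eq_get?_getD] at hv
    cases h : g.get? vertex with
    | none => rw [h] at hv; cases hv
    | some l =>
      rw [h] at hv
      exact List.mem_flatten.mpr ⟨l, List.mem_map_of_mem (PySem.Dict.mem_items_of_get?_eq_some g h), hv⟩
  have := pvBfsStep_measure g.values.flatten (g.getD vertex []) hn visited rest
  simp only [List.length_cons]
  omega

def bfs (matrix : List (List Int)) (start : Int) (end_ : Int) : Bool :=
  let graph := bfsGraph matrix
  let path := bfsLoop graph [] (PySem.Set.ofList [start]) [start]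
  if end_ ∈ path then true else false

-- ===== PORT B =====
-- frontier = {j for i in reach for j in range(n) if matrix[i][j] != 0 and j not in reach}
def altFrontier (matrix : List (List Int)) (reach : PySem.Set Int) : PySem.Set Int :=
  reach.foldl (fun fr i =>
    (PySem.List.pyRange 0 (matrix.length : Int) 1).foldl (fun fr j =>
      if pvEntry matrix i j ≠ 0 ∧ j ∉ reach then fr.add j else fr) fr) PySem.Set.empty

theorem pvMem_altFrontier (matrix : List (List Int)) (reach : PySem.Set Int) (y : Int) :
    y ∈ altFrontier matrix reach ↔
      ∃ i ∈ reach, y ∈ PySem.List.pyRange 0 (matrix.length : Int) 1 ∧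
        pvEntry matrix i y ≠ 0 ∧ y ∉ reach := by
  have inner : ∀ (i : Int) (l : List Int) (fr : PySem.Set Int) (y : Int),
      y ∈ l.foldl (fun fr j => if pvEntry matrix i j ≠ 0 ∧ j ∉ reach then fr.add j else fr) fr
        ↔ y ∈ fr ∨ (y ∈ l ∧ pvEntry matrix i y ≠ 0 ∧ y ∉ reach) := by
    intro i l
    induction l with
    | nil => intro fr y; simp
    | cons j tl ih =>
      intro fr y
      simp only [List.foldl_cons]
      by_cases hc : pvEntry matrix i j ≠ 0 ∧ j ∉ reach
      · rw [if_pos hc, ih, PySem.Set.mem_add]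
        by_cases hy : y = j
        · subst hy; simp [hc.1, hc.2]
        · simp only [List.mem_cons]
          constructor
          · rintro ((h | h) | h)
            · exact Or.inl h
            · exact absurd h hy
            · exact Or.inr ⟨Or.inr h.1, h.2⟩
          · rintro (h | ⟨(h | h), hC⟩)
            · exact Or.inl (Or.inl h)
            · exact absurd h hy
            · exact Or.inr ⟨h, hC⟩
      · rw [if_neg hc, ih]
        by_cases hy : y = j
        · subst hy
          constructor
          · rintro (h | h)
            · exact Or.inl h
            · exact Or.inr ⟨List.mem_cons_of_mem _ h.1, h.2⟩
          · rintro (h | ⟨_, hC⟩)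
            · exact Or.inl h
            · exact absurd hC hc
        · simp only [List.mem_cons]
          constructor
          · rintro (h | h)
            · exact Or.inl h
            · exact Or.inr ⟨Or.inr h.1, h.2⟩
          · rintro (h | ⟨(h | h), hC⟩)
            · exact Or.inl h
            · exact absurd h hy
            · exact Or.inr ⟨h, hC⟩
  have outer : ∀ (l : List Int) (acc : PySem.Set Int) (y : Int),
      y ∈ l.foldl (fun fr i =>
          (PySem.List.pyRange 0 (matrix.length : Int) 1).foldl
            (fun fr j => if pvEntry matrix i j ≠ 0 ∧ j ∉ reach then fr.add j else fr) fr) acc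
        ↔ y ∈ acc ∨ ∃ i ∈ l, y ∈ PySem.List.pyRange 0 (matrix.length : Int) 1 ∧
            pvEntry matrix i y ≠ 0 ∧ y ∉ reach := by
    intro l
    induction l with
    | nil => intro acc y; simp
    | cons i tl ih =>
      intro acc y
      simp only [List.foldl_cons]
      rw [ih, inner]
      simp only [List.mem_cons]
      constructor
      · rintro ((h | ⟨hm, hC⟩) | ⟨i', hi', h⟩)
        · exact Or.inl h
        · exact Or.inr ⟨i, Or.inl rfl, hm, hC⟩
        · exact Or.inr ⟨i', Or.inr hi', h⟩
      · rintro (h | ⟨i', (rfl | hi'), h⟩)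
        · exact Or.inl (Or.inl h)
        · exact Or.inl (Or.inr h)
        · exact Or.inr ⟨i', hi', h⟩
  simpa using outer reach PySem.Set.empty y

-- while True: … if not frontier: return …; reach |= frontier
def altLoop (matrix : List (List Int)) (reach : PySem.Set Int) : PySem.Set Int :=
  let fr := altFrontier matrix reach
  if h : fr = [] then reach
  else altLoop matrix (reach.union fr)
termination_by ((List.range matrix.length).filter (fun k : Nat => decide ((k : Int) ∉ reach))).length
decreasing_by
  rcases List.exists_mem_of_ne_nil _ h with ⟨j, hj⟩
  rcases (pvMem_altFrontier matrix reach j).mp hj with ⟨i, _, hjr, _, hjnr⟩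
  rcases PySem.List.mem_pyRange_one.mp hjr with ⟨hj0, hjn⟩
  have himp : ∀ k : Nat, (decide ((k : Int) ∉ reach.union (altFrontier matrix reach))) = true →
      (decide ((k : Int) ∉ reach)) = true := by
    intro k hk
    simp only [decide_eq_true_eq, PySem.Set.mem_union] at hk ⊢
    exact fun hmem => hk (Or.inl hmem)
  have hv : j.toNat ∈ List.range matrix.length := List.mem_range.mpr (by omega)
  have hp : (decide ((j.toNat : Int) ∉ reach)) = true := by
    simp only [decide_eq_true_eq, Int.toNat_of_nonneg hj0]; exact hjnr
  have hq : (decide ((j.toNat : Int) ∉ reach.union (altFrontier matrix reach))) = false := by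
    simp only [decide_eq_false_iff_not, Int.toNat_of_nonneg hj0, Decidable.not_not,
      PySem.Set.mem_union]
    exact Or.inr hj
  exact pvFilterLenLt (List.range matrix.length) himp hv hp hq

def bfs_alt (matrix : List (List Int)) (start : Int) (end_ : Int) : Bool :=
  decide (end_ ∈ altLoop matrix (PySem.Set.ofList [start]))

-- ===== PRECONDITION & SPEC =====
-- Pre_bfs is exactly the domain on which the Python A returns: every row must be at least
-- len(matrix) long (else IndexError) and start must be a key of graph, i.e. 0 ≤ start < len(matrix)
-- (else KeyError when start is dequeued).
def Pre_bfs (matrix : List (List Int)) (start : Int) (end_ : Int) : Prop :=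
  (∀ row ∈ matrix, matrix.length ≤ row.length) ∧ 0 ≤ start ∧ start < (matrix.length : Int)
instance (matrix : List (List Int)) (start : Int) (end_ : Int) : Decidable (Pre_bfs matrix start end_) := by unfold Pre_bfs; infer_instance

def pvWitness_bfs : List (List Int) × Int × Int := ([[0, 1], [0, 0]], 0, 1)

def Spec_bfs (matrix : List (List Int)) (start : Int) (end_ : Int) (out : Bool) : Prop := out = bfs_alt matrix start end_
instance (matrix : List (List Int)) (start : Int) (end_ : Int) (out : Bool) : Decidable (Spec_bfs matrix start end_ out) := by unfold Spec_bfs; infer_instance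

-- ===== CLAIM (what is proved, stated in full; the proofs are below) =====
def Claim_equal_bfs : Prop := ∀ (matrix : List (List Int)) (start : Int) (end_ : Int), Dom_bfs matrix start end_ → Pre_bfs matrix start end_ → Spec_bfs matrix start end_ (bfs matrix start end_)

-- ===== LEMMAS AND PROOFS =====


-- edge relation of the matrix (as both programs read it)
def pvEdge (matrix : List (List Int)) (x y : Int) : Prop :=
  0 ≤ x ∧ x < (matrix.length : Int) ∧ 0 ≤ y ∧ y < (matrix.length : Int) ∧ pvEntry matrix x y ≠ 0

inductive pvReach (matrix : List (List Int)) (s : Int) : Int → Prop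
  | refl : pvReach matrix s s
  | step {x y : Int} : pvReach matrix s x → pvEdge matrix x y → pvReach matrix s y

theorem pvMem_bfsRow (matrix : List (List Int)) (x y : Int) :
    y ∈ bfsRow matrix x ↔
      y ∈ PySem.List.pyRange 0 (matrix.length : Int) 1 ∧ pvEntry matrix x y ≠ 0 := by
  unfold bfsRow
  rw [PySem.List.foldl_append_ite_eq_filter (fun j => pvEntry matrix x j ≠ 0)]
  simp [List.mem_filter]

theorem pvGraph_getD (matrix : List (List Int)) (x : Int) :
    (bfsGraph matrix).getD x [] =
      if 0 ≤ x ∧ x < (matrix.length : Int) then bfsRow matrix x else [] := by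
  unfold bfsGraph
  have key : ∀ n : Nat,
      ((PySem.List.pyRange 0 (n : Int) 1).foldl
          (fun g i => g.insert i (bfsRow matrix i)) PySem.Dict.empty).getD x []
        = if 0 ≤ x ∧ x < (n : Int) then bfsRow matrix x else [] := by
    intro n
    induction n with
    | zero => simp [PySem.List.pyRange]
    | succ n ih =>
      have hcast : ((n + 1 : Nat) : Int) = (n : Int) + 1 := by push_cast; ring
      rw [hcast, PySem.List.pyRange_one_succ_right (by positivity), List.foldl_append]
      simp only [List.foldl_cons, List.foldl_nil]
      rw [PySem.Dict.getD_insert, ih]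
      by_cases hx : x = (n : Int)
      · subst hx
        rw [if_pos rfl,
          if_pos (show (0:Int) ≤ (n:Int) ∧ (n:Int) < (n:Int) + 1 from
            ⟨Int.natCast_nonneg n, by omega⟩)]
      · rw [if_neg hx]
        split_ifs with h1 h2 h2 <;> first | rfl | omega
  exact key matrix.length

-- membership bookkeeping of one BFS inner loop
theorem pvBfsFold_mem (nbs : List Int) : ∀ (vis : PySem.Set Int) (q : List Int),
    (∀ x, x ∈ (nbs.foldl bfsStep (vis, q)).1 ↔ x ∈ vis ∨ x ∈ nbs) ∧
    (∀ x, x ∈ (nbs.foldl bfsStep (vis, q)).2 → x ∈ q ∨ x ∈ nbs) ∧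
    (∀ x ∈ q, x ∈ (nbs.foldl bfsStep (vis, q)).2) ∧
    (∀ x, x ∈ (nbs.foldl bfsStep (vis, q)).1 → x ∈ vis ∨ x ∈ (nbs.foldl bfsStep (vis, q)).2) := by
  induction nbs with
  | nil =>
    intro vis q
    exact ⟨fun x => by simp, fun x hx => Or.inl hx, fun x hx => hx, fun x hx => Or.inl hx⟩
  | cons v tl ih =>
    intro vis q
    simp only [List.foldl_cons]
    by_cases hmem : v ∈ vis
    · have hstep : bfsStep (vis, q) v = (vis, q) := by simp [bfsStep, hmem]
      simp only [hstep]
      obtain ⟨a, b, c, d⟩ := ih vis q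
      refine ⟨fun x => ?_, fun x hx => ?_, c, d⟩
      · rw [a x]
        simp only [List.mem_cons]
        constructor
        · rintro (h | h)
          · exact Or.inl h
          · exact Or.inr (Or.inr h)
        · rintro (h | rfl | h)
          · exact Or.inl h
          · exact Or.inl hmem
          · exact Or.inr h
      · rcases b x hx with h | h
        · exact Or.inl h
        · exact Or.inr (List.mem_cons_of_mem _ h)
    · have hstep : bfsStep (vis, q) v = (vis.add v, q ++ [v]) := by simp [bfsStep, hmem]
      simp only [hstep]
      obtain ⟨a, b, c, d⟩ := ih (vis.add v) (q ++ [v])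
      refine ⟨fun x => ?_, fun x hx => ?_, fun x hx => ?_, fun x hx => ?_⟩
      · rw [a x, PySem.Set.mem_add]
        simp only [List.mem_cons]
        tauto
      · rcases b x hx with h | h
        · rcases List.mem_append.mp h with h | h
          · exact Or.inl h
          · exact Or.inr (by simp [List.mem_singleton.mp h])
        · exact Or.inr (List.mem_cons_of_mem _ h)
      · exact c x (List.mem_append_left _ hx)
      · rcases d x hx with h | h
        · rcases (PySem.Set.mem_add vis v x).mp h with h | rfl
          · exact Or.inl h
          · exact Or.inr (c x (List.mem_append_right _ (List.mem_singleton_self _)))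
        · exact Or.inr h

theorem pvBfsLoop_spec (g : PySem.Dict Int (List Int)) (R : Int → Prop)
    (hR : ∀ x y, R x → y ∈ g.getD x [] → R y) :
    ∀ (path : List Int) (visited : PySem.Set Int) (queue : List Int),
    (∀ x ∈ queue, x ∈ visited) →
    (∀ x ∈ path, x ∈ visited) →
    (∀ x ∈ visited, x ∈ path ∨ x ∈ queue) →
    (∀ x ∈ path, ∀ y ∈ g.getD x [], y ∈ visited) →
    (∀ x ∈ visited, R x) →
    (∀ x ∈ bfsLoop g path visited queue, R x) ∧
    (∀ x ∈ visited, x ∈ bfsLoop g path visited queue) ∧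
    (∀ x ∈ bfsLoop g path visited queue, ∀ y ∈ g.getD x [], y ∈ bfsLoop g path visited queue) := by
  intro path visited queue
  induction path, visited, queue using bfsLoop.induct (g := g) with
  | case1 path visited =>
    intro h1 h2 h3 h4 h5
    have heq : bfsLoop g path visited [] = path := by rw [bfsLoop]
    rw [heq]
    refine ⟨fun x hx => h5 x (h2 x hx), fun x hx => ?_, fun x hx y hy => ?_⟩
    · rcases h3 x hx with h | h
      · exact h
      · cases h
    · rcases h3 y (h4 x hx y hy) with h | h
      · exact h
      · cases h
  | case2 path visited vertex rest vq ih =>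
    intro h1 h2 h3 h4 h5
    have heq : bfsLoop g path visited (vertex :: rest) =
        bfsLoop g (path ++ [vertex])
          ((g.getD vertex []).foldl bfsStep (visited, rest)).1
          ((g.getD vertex []).foldl bfsStep (visited, rest)).2 := by
      conv_lhs => rw [bfsLoop]
    rw [heq]
    obtain ⟨fa, fb, fc, fd⟩ := pvBfsFold_mem (g.getD vertex []) visited rest
    have hvv : vertex ∈ visited := h1 vertex List.mem_cons_self
    have H1 : ∀ x ∈ ((g.getD vertex []).foldl bfsStep (visited, rest)).2,
        x ∈ ((g.getD vertex []).foldl bfsStep (visited, rest)).1 := by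
      intro x hx
      rcases fb x hx with h | h
      · exact (fa x).mpr (Or.inl (h1 x (List.mem_cons_of_mem _ h)))
      · exact (fa x).mpr (Or.inr h)
    have H2 : ∀ x ∈ path ++ [vertex],
        x ∈ ((g.getD vertex []).foldl bfsStep (visited, rest)).1 := by
      intro x hx
      rcases List.mem_append.mp hx with h | h
      · exact (fa x).mpr (Or.inl (h2 x h))
      · exact (fa x).mpr (Or.inl (List.mem_singleton.mp h ▸ hvv))
    have H3 : ∀ x ∈ ((g.getD vertex []).foldl bfsStep (visited, rest)).1,
        x ∈ path ++ [vertex] ∨ x ∈ ((g.getD vertex []).foldl bfsStep (visited, rest)).2 := by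
      intro x hx
      rcases fd x hx with h | h
      · rcases h3 x h with hp | hq
        · exact Or.inl (List.mem_append_left _ hp)
        · rcases List.mem_cons.mp hq with rfl | hr
          · exact Or.inl (List.mem_append_right _ (List.mem_singleton_self _))
          · exact Or.inr (fc x hr)
      · exact Or.inr h
    have H4 : ∀ x ∈ path ++ [vertex], ∀ y ∈ g.getD x [],
        y ∈ ((g.getD vertex []).foldl bfsStep (visited, rest)).1 := by
      intro x hx y hy
      rcases List.mem_append.mp hx with h | h
      · exact (fa y).mpr (Or.inl (h4 x h y hy))
      · rw [List.mem_singleton.mp h] at hy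
        exact (fa y).mpr (Or.inr hy)
    have H5 : ∀ x ∈ ((g.getD vertex []).foldl bfsStep (visited, rest)).1, R x := by
      intro x hx
      rcases (fa x).mp hx with h | h
      · exact h5 x h
      · exact hR vertex x (h5 vertex hvv) h
    obtain ⟨c1, c2, c3⟩ := ih H1 H2 H3 H4 H5
    exact ⟨c1, fun x hx => c2 x ((fa x).mpr (Or.inl hx)), c3⟩

theorem pvAltLoop_spec (matrix : List (List Int)) (R : Int → Prop)
    (hR : ∀ x y, R x → pvEdge matrix x y → R y) :
    ∀ (reach : PySem.Set Int),
    (∀ x ∈ reach, 0 ≤ x ∧ x < (matrix.length : Int)) →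
    (∀ x ∈ reach, R x) →
    (∀ x ∈ altLoop matrix reach, R x) ∧
    (∀ x ∈ reach, x ∈ altLoop matrix reach) ∧
    (∀ x ∈ altLoop matrix reach, ∀ y, pvEdge matrix x y → y ∈ altLoop matrix reach) := by
  intro reach
  induction reach using altLoop.induct (matrix := matrix) with
  | case1 reach fr hnil =>
    intro hrange hsound
    have hnil' : altFrontier matrix reach = [] := hnil
    have heq : altLoop matrix reach = reach := by
      rw [altLoop]
      simp [hnil']
    rw [heq]
    refine ⟨hsound, fun x hx => hx, fun x hx y hxy => ?_⟩
    by_cases hy : y ∈ reach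
    · exact hy
    · exfalso
      have hyf : y ∈ altFrontier matrix reach := by
        rw [pvMem_altFrontier]
        exact ⟨x, hx, PySem.List.mem_pyRange_one.mpr ⟨hxy.2.2.1, hxy.2.2.2.1⟩,
          hxy.2.2.2.2, hy⟩
      rw [hnil'] at hyf
      cases hyf
  | case2 reach fr hnil ih =>
    intro hrange hsound
    have hnil' : ¬ altFrontier matrix reach = [] := hnil
    have heq : altLoop matrix reach =
        altLoop matrix (reach.union (altFrontier matrix reach)) := by
      conv_lhs => rw [altLoop]
      simp only [dif_neg hnil']
    rw [heq]
    have hfr_mem : ∀ y ∈ altFrontier matrix reach, (0 ≤ y ∧ y < (matrix.length : Int)) ∧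
        ∃ i ∈ reach, pvEntry matrix i y ≠ 0 ∧ y ∉ reach := by
      intro y hy
      rw [pvMem_altFrontier] at hy
      obtain ⟨i, hi, hyr, hent, hynr⟩ := hy
      exact ⟨⟨(PySem.List.mem_pyRange_one.mp hyr).1, (PySem.List.mem_pyRange_one.mp hyr).2⟩,
        i, hi, hent, hynr⟩
    have hrange' : ∀ x ∈ reach.union (altFrontier matrix reach),
        0 ≤ x ∧ x < (matrix.length : Int) := by
      intro x hx
      rcases (PySem.Set.mem_union reach _ x).mp hx with h | h
      · exact hrange x h
      · exact (hfr_mem x h).1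
    have hsound' : ∀ x ∈ reach.union (altFrontier matrix reach), R x := by
      intro x hx
      rcases (PySem.Set.mem_union reach _ x).mp hx with h | h
      · exact hsound x h
      · obtain ⟨hb, i, hi, hent, _⟩ := hfr_mem x h
        exact hR i x (hsound i hi)
          ⟨(hrange i hi).1, (hrange i hi).2, hb.1, hb.2, hent⟩
    obtain ⟨c1, c2, c3⟩ := ih hrange' hsound'
    exact ⟨c1, fun x hx => c2 x ((PySem.Set.mem_union reach _ x).mpr (Or.inl hx)), c3⟩

-- ===== VERDICT (by name: the statement is the Claim_ definition above) =====
theorem bfs_spec : Claim_equal_bfs := by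
  intro matrix start end_ _hdom hpre
  obtain ⟨_hrows, hs0, hsn⟩ := hpre
  unfold Spec_bfs bfs bfs_alt
  have hg : ∀ x y : Int, y ∈ (bfsGraph matrix).getD x [] ↔ pvEdge matrix x y := by
    intro x y
    rw [pvGraph_getD]
    split_ifs with hx
    · rw [pvMem_bfsRow, PySem.List.mem_pyRange_one]
      constructor
      · rintro ⟨⟨hy0, hyn⟩, hent⟩
        exact ⟨hx.1, hx.2, hy0, hyn, hent⟩
      · rintro ⟨_, _, hy0, hyn, hent⟩
        exact ⟨⟨hy0, hyn⟩, hent⟩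
    · simp only [List.not_mem_nil, false_iff]
      rintro ⟨hx0, hxn, _⟩
      exact hx ⟨hx0, hxn⟩
  have hsingle : PySem.Set.ofList [start] = [start] := rfl
  rw [hsingle]
  set R := pvReach matrix start with hRdef
  have hRA : ∀ x y, R x → y ∈ (bfsGraph matrix).getD x [] → R y :=
    fun x y hx hy => pvReach.step hx ((hg x y).mp hy)
  have hRB : ∀ x y, R x → pvEdge matrix x y → R y :=
    fun x y hx he => pvReach.step hx he
  obtain ⟨a1, a2, a3⟩ := pvBfsLoop_spec (bfsGraph matrix) R hRA [] [start] [start]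
    (fun x hx => hx) (fun x hx => absurd hx (List.not_mem_nil).elim)
    (fun x hx => Or.inr hx) (fun x hx => absurd hx (List.not_mem_nil).elim)
    (fun x hx => (List.mem_singleton.mp hx) ▸ pvReach.refl)
  obtain ⟨b1, b2, b3⟩ := pvAltLoop_spec matrix R hRB [start]
    (fun x hx => (List.mem_singleton.mp hx) ▸ ⟨hs0, hsn⟩)
    (fun x hx => (List.mem_singleton.mp hx) ▸ pvReach.refl)
  have hAcomplete : ∀ y, R y → y ∈ bfsLoop (bfsGraph matrix) [] [start] [start] := by
    intro y hy
    induction hy with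
    | refl => exact a2 start (List.mem_singleton_self _)
    | step hx he ihx => exact a3 _ ihx _ ((hg _ _).mpr he)
  have hBcomplete : ∀ y, R y → y ∈ altLoop matrix [start] := by
    intro y hy
    induction hy with
    | refl => exact b2 start (List.mem_singleton_self _)
    | step hx he ihx => exact b3 _ ihx _ he
  have hiff : end_ ∈ bfsLoop (bfsGraph matrix) [] [start] [start] ↔
      end_ ∈ altLoop matrix [start] :=
    ⟨fun h => hBcomplete end_ (a1 end_ h), fun h => hAcomplete end_ (b1 end_ h)⟩
  by_cases hend : end_ ∈ bfsLoop (bfsGraph matrix) [] [start] [start]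
  · rw [if_pos hend, eq_comm, decide_eq_true_eq]
    exact hiff.mp hend
  · rw [if_neg hend, eq_comm, decide_eq_false_iff_not]
    exact fun h => hend (hiff.mpr h)
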